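-- pv_equiv track=rewrite | github.com/codybartfast/aoc-2018-py | day04.py | naps_by_guard
-- ===== SOURCE A (Python) =====
-- def naps_by_guard(observations):
--     nap_db = {}
--
--     for i, (minute, event) in enumerate(observations):
--         match event[0]:
--             case "#":  #  #<guard-id>
--                 guard = event
--                 time_asleep, nap_spans = nap_db.get(guard, (0, []))
--             case "a":  # falls [a]sleep
--                 nap_start = minute
--             case "u":  # wakes [u]p
--                 time_asleep += minute - nap_start
--                 nap_spans.append((nap_start, minute))
--                 nap_db[guard] = time_asleep, nap_spans
--             case _:
--                 assert False, event
--
--     return nap_db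
-- ===== SOURCE B (Python) =====
-- def naps_by_guard(observations):
--     # Pass 1: flatten the event stream into one record per completed nap.
--     naps = []  # (guard, start, end) per wake-up, in event order
--     for minute, event in observations:
--         match event[0]:
--             case "#":  #  #<guard-id>
--                 guard = event
--             case "a":  # falls [a]sleep
--                 nap_start = minute
--             case "u":  # wakes [u]p
--                 naps.append((guard, nap_start, minute))
--             case _:
--                 assert False, event
--     # Pass 2: group the nap records by guard, then aggregate totals per guard.
--     spans_by_guard = {}
--     for g, s, e in naps:
--         spans_by_guard.setdefault(g, []).append((s, e))
--     return {g: (sum(e - s for s, e in spans), spans)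
--             for g, spans in spans_by_guard.items()}
-- ===== Notes on version B (the rewrite author's own statement) =====
-- stated objective: alternative
-- what changed: B replaces A's single pass with an inline running-total/dict accumulator by a two-phase decomposition: pass 1 flattens the event stream into per-nap (guard, start, end) records, pass 2 groups the records by guard and computes each guard's total sleep by summing its spans.
import Mathlib
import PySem

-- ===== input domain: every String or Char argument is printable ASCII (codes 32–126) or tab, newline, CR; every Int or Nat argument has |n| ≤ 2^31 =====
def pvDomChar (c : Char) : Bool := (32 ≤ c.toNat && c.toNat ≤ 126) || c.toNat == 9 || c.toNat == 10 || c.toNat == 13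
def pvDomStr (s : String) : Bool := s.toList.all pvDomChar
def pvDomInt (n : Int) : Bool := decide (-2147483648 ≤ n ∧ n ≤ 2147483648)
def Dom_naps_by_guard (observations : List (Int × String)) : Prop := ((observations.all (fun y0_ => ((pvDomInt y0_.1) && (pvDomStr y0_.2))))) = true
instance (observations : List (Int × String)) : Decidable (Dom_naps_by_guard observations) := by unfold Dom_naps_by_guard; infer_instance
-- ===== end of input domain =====

-- B replaces A's inline running-total/dict accumulator by a two-phase decomposition
-- (flatten the event stream to per-nap records, then group by guard and aggregate);
-- objective: alternative, same cost.

-- ===== PORT A =====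
-- A's loop state: (nap_db, guard, time_asleep, nap_spans, nap_start); the last four are Python
-- locals that may be unbound (none = unbound; Python raises NameError when an unbound one is
-- read, which Pre_ excludes — on those inputs the port leaves the state unchanged).  Python's
-- 'match event[0]' on literal string patterns is ported as the equivalent comparison chain;
-- event[0] is PySem.Str.pyGet? event 0 (none = IndexError, excluded by Pre_).
def napsA_step
    (st : PySem.Dict String (Int × List (Int × Int)) × Option String × Option Int ×
          Option (List (Int × Int)) × Option Int)
    (x : Int × String) :
    PySem.Dict String (Int × List (Int × Int)) × Option String × Option Int ×
    Option (List (Int × Int)) × Option Int :=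
  let db := st.1; let guard := st.2.1; let ta := st.2.2.1; let sp := st.2.2.2.1; let ns := st.2.2.2.2
  let minute := x.1; let event := x.2
  let c := PySem.Str.pyGet? event 0
  if c = some '#' then          -- guard = event; time_asleep, nap_spans = nap_db.get(guard, (0, []))
    let tv := db.getD event (0, [])
    (db, some event, some tv.1, some tv.2, ns)
  else if c = some 'a' then     -- nap_start = minute
    (db, guard, ta, sp, some minute)
  else if c = some 'u' then     -- time_asleep += …; nap_spans.append(…); nap_db[guard] = …
    match guard, ta, sp, ns with
    | some g, some t, some s, some n =>
        (db.insert g (t + (minute - n), s ++ [(n, minute)]),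
         some g, some (t + (minute - n)), some (s ++ [(n, minute)]), some n)
    | _, _, _, _ => st          -- Python: NameError (excluded by Pre_)
  else st                       -- Python: assert False (or IndexError), excluded by Pre_

def naps_by_guard (observations : List (Int × String)) : List (String × Int × (List (Int × Int))) :=
  ((PySem.List.enumerate observations).foldl (fun st p => napsA_step st p.2)
    (PySem.Dict.empty, none, none, none, none)).1.items

-- ===== PORT B =====
-- Pass 1 state: (naps, guard, nap_start); guard/nap_start may be unbound (NameError → Pre_ excludes).
def napsB_scan
    (st : List (String × Int × Int) × Option String × Option Int) (x : Int × String) :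
    List (String × Int × Int) × Option String × Option Int :=
  let naps := st.1; let guard := st.2.1; let ns := st.2.2
  let minute := x.1; let event := x.2
  let c := PySem.Str.pyGet? event 0
  if c = some '#' then (naps, some event, ns)
  else if c = some 'a' then (naps, guard, some minute)
  else if c = some 'u' then
    match guard, ns with
    | some g, some n => (naps ++ [(g, n, minute)], some g, some n)
    | _, _ => st                -- Python: NameError (excluded by Pre_)
  else st                       -- Python: assert False (or IndexError), excluded by Pre_

-- spans_by_guard.setdefault(g, []).append((s, e)) : Dict.insert overwrites in place /
-- appends a fresh key at the end, exactly Python's setdefault-then-append on the dict.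
def napsB_group (G : PySem.Dict String (List (Int × Int))) (r : String × Int × Int) :
    PySem.Dict String (List (Int × Int)) :=
  G.insert r.1 (G.getD r.1 [] ++ [(r.2.1, r.2.2)])

-- sum(e - s for s, e in spans)
def napTotal (spans : List (Int × Int)) : Int := (spans.map (fun se => se.2 - se.1)).sum

def naps_by_guard_alt (observations : List (Int × String)) : List (String × Int × (List (Int × Int))) :=
  let naps := (observations.foldl napsB_scan ([], none, none)).1
  let grouped := naps.foldl napsB_group PySem.Dict.empty
  grouped.items.map (fun kv => (kv.1, (napTotal kv.2, kv.2)))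

-- ===== PRECONDITION & SPEC =====
-- Well-formed event streams: every event is nonempty and starts with '#', 'a' or 'u', and every
-- 'u' is preceded (anywhere earlier) by some '#' event and some 'a' event.  Exactly on the other
-- inputs Python A raises (IndexError on event[0], AssertionError, or NameError on an unbound
-- guard/time_asleep/nap_spans/nap_start), so Pre_ excludes only inputs on which A raises.
def napWF (hasG hasA : Bool) : List (Int × String) → Bool
  | [] => true
  | (_, e) :: rest =>
    let c := PySem.Str.pyGet? e 0
    if c = some '#' then napWF true hasA rest
    else if c = some 'a' then napWF hasG true rest
    else if c = some 'u' then hasG && hasA && napWF hasG hasA rest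
    else false

def Pre_naps_by_guard (observations : List (Int × String)) : Prop :=
  napWF false false observations = true

instance (observations : List (Int × String)) : Decidable (Pre_naps_by_guard observations) := by
  unfold Pre_naps_by_guard; infer_instance

def pvWitness_naps_by_guard : (List (Int × String)) :=
  [(0, "#99"), (5, "asleep"), (25, "up"), (30, "asleep"), (55, "up"),
   (0, "#10"), (20, "asleep"), (40, "up")]

def Spec_naps_by_guard (observations : List (Int × String)) (out : List (String × Int × (List (Int × Int)))) : Prop := out = naps_by_guard_alt observations
instance (observations : List (Int × String)) (out : List (String × Int × (List (Int × Int)))) : Decidable (Spec_naps_by_guard observations out) := by unfold Spec_naps_by_guard; infer_instance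

-- ===== CLAIM (what is proved, stated in full; the proofs are below) =====
def Claim_equal_naps_by_guard : Prop := ∀ (observations : List (Int × String)), Dom_naps_by_guard observations → Pre_naps_by_guard observations → Spec_naps_by_guard observations (naps_by_guard observations)

-- ===== LEMMAS AND PROOFS =====

-- Fused form of B (proof helper): grouping interleaved with the scan.
def napsC_step (st : PySem.Dict String (List (Int × Int)) × Option String × Option Int)
    (x : Int × String) : PySem.Dict String (List (Int × Int)) × Option String × Option Int :=
  let G := st.1; let guard := st.2.1; let ns := st.2.2
  let c := PySem.Str.pyGet? x.2 0
  if c = some '#' then (G, some x.2, ns)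
  else if c = some 'a' then (G, guard, some x.1)
  else if c = some 'u' then
    match guard, ns with
    | some g, some n => (napsB_group G (g, n, x.1), some g, some n)
    | _, _ => st
  else st

-- Dropping the unused enumerate index.
theorem foldl_enumerate_snd {α β : Type} (f : β → α → β) :
    ∀ (l : List α) (s : Int) (st : β),
      (PySem.List.enumerate l s).foldl (fun st p => f st p.2) st = l.foldl f st := by
  intro l
  induction l with
  | nil => intro s st; rfl
  | cons x t ih =>
      intro s st
      rw [PySem.List.enumerate_cons]
      simpa using ih (s + 1) (f st x)

-- A's db entry for a guard = (total, spans) of B's grouped spans.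
def dbOf (G : PySem.Dict String (List (Int × Int))) :
    PySem.Dict String (Int × List (Int × Int)) :=
  PySem.Dict.mk (G.items.map (fun kv => (kv.1, (napTotal kv.2, kv.2))))

theorem dbOf_get? (G : PySem.Dict String (List (Int × Int))) (k : String) :
    (dbOf G).get? k = (G.get? k).map (fun v => (napTotal v, v)) := by
  obtain ⟨l⟩ := G
  induction l with
  | nil => rfl
  | cons p t ih =>
      obtain ⟨pk, pv⟩ := p
      simp only [dbOf, List.map_cons] at *
      rw [PySem.Dict.get?_mk_cons, PySem.Dict.get?_mk_cons]
      by_cases h : (pk == k) = true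
      · simp [h]
      · simp only [h]
        exact ih

theorem dbOf_getD (G : PySem.Dict String (List (Int × Int))) (k : String) :
    (dbOf G).getD k (0, []) = (napTotal (G.getD k []), G.getD k []) := by
  rw [PySem.Dict.getD_eq_get?_getD, PySem.Dict.getD_eq_get?_getD, dbOf_get?]
  cases G.get? k <;> simp [napTotal]

theorem dbOf_contains (G : PySem.Dict String (List (Int × Int))) (k : String) :
    (dbOf G).contains k = G.contains k := by
  rw [PySem.Dict.contains_eq_isSome_get?, PySem.Dict.contains_eq_isSome_get?, dbOf_get?]
  cases G.get? k <;> rfl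

theorem dbOf_insert (G : PySem.Dict String (List (Int × Int))) (k : String)
    (v : List (Int × Int)) :
    dbOf (G.insert k v) = (dbOf G).insert k (napTotal v, v) := by
  apply PySem.Dict.ext
  have hi : (dbOf (G.insert k v)).items
      = (G.insert k v).items.map (fun kv => (kv.1, (napTotal kv.2, kv.2))) := rfl
  have hd : (dbOf G).items = G.items.map (fun kv => (kv.1, (napTotal kv.2, kv.2))) := rfl
  rw [hi, PySem.Dict.items_insert, PySem.Dict.items_insert, hd, dbOf_contains]
  by_cases h : G.contains k = true
  · simp only [h, if_true, List.map_map]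
    apply List.map_congr_left
    intro p _
    by_cases hpk : p.1 = k <;> simp [hpk]
  · simp [h]

theorem napTotal_append (s : List (Int × Int)) (n m : Int) :
    napTotal (s ++ [(n, m)]) = napTotal s + (m - n) := by
  simp [napTotal]

-- B's composite (scan, then group) equals the fused grouped scan; no precondition needed.
theorem scan_group (obs : List (Int × String)) :
    ∀ (naps : List (String × Int × Int)) (gd : Option String) (ns : Option Int)
      (G0 : PySem.Dict String (List (Int × Int))),
      ((obs.foldl napsB_scan (naps, gd, ns)).1.foldl napsB_group G0,
        (obs.foldl napsB_scan (naps, gd, ns)).2)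
      = obs.foldl napsC_step (naps.foldl napsB_group G0, gd, ns) := by
  induction obs with
  | nil => intro naps gd ns G0; rfl
  | cons x t ih =>
      intro naps gd ns G0
      simp only [List.foldl_cons, napsB_scan, napsC_step]
      split_ifs with h1 h2 h3
      · exact ih naps (some x.2) ns G0
      · exact ih naps gd (some x.1) G0
      · cases gd with
        | none => cases ns <;> exact ih naps none _ G0
        | some g =>
          cases ns with
          | none => exact ih naps (some g) none G0
          | some n =>
            have := ih (naps ++ [(g, n, x.1)]) (some g) (some n) G0
            simpa [List.foldl_append] using this
      · exact ih naps gd ns G0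

-- The invariant tying A's fold state to the fused grouped scan's state.
def napRel
    (a : PySem.Dict String (Int × List (Int × Int)) × Option String × Option Int ×
         Option (List (Int × Int)) × Option Int)
    (c : PySem.Dict String (List (Int × Int)) × Option String × Option Int) : Prop :=
  a.1 = dbOf c.1 ∧ a.2.1 = c.2.1 ∧ a.2.2.2.2 = c.2.2 ∧
  ∀ g, a.2.1 = some g →
    a.2.2.1 = some (napTotal (c.1.getD g [])) ∧ a.2.2.2.1 = some (c.1.getD g [])

-- Main invariant: on a well-formed stream A's fold tracks dbOf of the fused grouped scan.
theorem A_tracks :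
    ∀ (obs : List (Int × String)) (hasG hasA : Bool), napWF hasG hasA obs = true →
    ∀ a c, napRel a c → a.2.1.isSome = hasG → a.2.2.2.2.isSome = hasA →
    napRel (obs.foldl napsA_step a) (obs.foldl napsC_step c) := by
  intro obs
  induction obs with
  | nil => intro hasG hasA _ a c hrel _ _; exact hrel
  | cons x t ih =>
      intro hasG hasA hwf a c hrel hG hA
      obtain ⟨hdb, hgd, hns, hloc⟩ := hrel
      simp only [napWF] at hwf
      simp only [List.foldl_cons, napsA_step, napsC_step]
      split_ifs at hwf ⊢ with h1 h2 h3
      · -- '#'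
        refine ih true hasA hwf _ _ ⟨?_, rfl, ?_, ?_⟩ rfl (by simpa [hns] using hA)
        · exact hdb
        · exact hns
        · intro g hg
          obtain rfl : x.2 = g := by injection hg
          rw [hdb, dbOf_getD]
          exact ⟨rfl, rfl⟩
      · -- 'a'
        exact ih hasG true hwf _ _ ⟨hdb, hgd, rfl, hloc⟩ (by simpa [hgd] using hG) rfl
      · -- 'u'
        rw [Bool.and_eq_true, Bool.and_eq_true] at hwf
        obtain ⟨⟨hGt, hAt⟩, hwf⟩ := hwf
        obtain ⟨g, hg⟩ := Option.isSome_iff_exists.mp (hG.trans hGt)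
        obtain ⟨n, hn⟩ := Option.isSome_iff_exists.mp (hA.trans hAt)
        obtain ⟨hta, hsp⟩ := hloc g hg
        have hcg : c.2.1 = some g := hgd.symm.trans hg
        have hcn : c.2.2 = some n := hns.symm.trans hn
        rw [hg, hta, hsp, hn, hcg, hcn, hdb]
        refine ih hasG hasA hwf _ _ ⟨?_, rfl, rfl, ?_⟩ (by simp [hGt]) (by simp [hAt])
        · simp [napsB_group, dbOf_insert, napTotal_append]
        · intro g' hg'
          obtain rfl : g = g' := by injection hg'
          simp [napsB_group, PySem.Dict.getD_insert_self, napTotal_append]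

-- ===== VERDICT (by name: the statement is the Claim_ definition above) =====
theorem naps_by_guard_spec : Claim_equal_naps_by_guard := by
  intro obs _ hpre
  unfold Spec_naps_by_guard
  have hrel : napRel (obs.foldl napsA_step (PySem.Dict.empty, none, none, none, none))
      (obs.foldl napsC_step (PySem.Dict.empty, none, none)) := by
    refine A_tracks obs false false hpre _ _ ⟨rfl, rfl, rfl, ?_⟩ rfl rfl
    intro g hg; cases hg
  have hgrp : (obs.foldl napsB_scan ([], none, none)).1.foldl napsB_group PySem.Dict.empty
      = (obs.foldl napsC_step (PySem.Dict.empty, none, none)).1 :=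
    congrArg Prod.fst (scan_group obs [] none none PySem.Dict.empty)
  have hA' : naps_by_guard obs
      = (dbOf (obs.foldl napsC_step (PySem.Dict.empty, none, none)).1).items := by
    unfold naps_by_guard
    rw [foldl_enumerate_snd, hrel.1]
  have hB' : naps_by_guard_alt obs
      = ((obs.foldl napsC_step (PySem.Dict.empty, none, none)).1).items.map
          (fun kv => (kv.1, (napTotal kv.2, kv.2))) := by
    show ((obs.foldl napsB_scan ([], none, none)).1.foldl napsB_group
        PySem.Dict.empty).items.map (fun kv => (kv.1, (napTotal kv.2, kv.2))) = _
    rw [hgrp]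
  rw [hA', hB']
  rfl
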